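-- pv_equiv track=rewrite | github.com/098tarik/leetcode-portfolio | Sliding_Windows/best_sales.py | best_day
-- ===== SOURCE A (Python) =====
-- def best_day(sales, k):
--
--     l = 0
--     r = 0
--
--     max_sales = 0
--     sale_sum = 0
--     best_day = 0
--
--     while r < len(sales):
--         sale_sum += sales[r]
--         r += 1
--
--         if r - l == k:
--             if sale_sum > max_sales:
--                 max_sales = sale_sum
--                 best_day = l
--             sale_sum -= sales[l]
--             l += 1
--
--     return best_day
-- ===== SOURCE B (Python) =====
-- def best_day(sales, k):
--     # prefix sums: pre[i] = sum of sales[:i]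
--     pre = [0]
--     for x in sales:
--         pre.append(pre[-1] + x)
--     best = 0
--     max_sales = 0
--     if k >= 1:
--         for l in range(len(sales) - k + 1):
--             s = pre[l + k] - pre[l]
--             if s > max_sales:
--                 max_sales = s
--                 best = l
--     return best
-- ===== Notes on version B (the rewrite author's own statement) =====
-- stated objective: alternative
-- what changed: Replaces A's single sliding-window loop with running sum and moving left pointer by a prefix-sum list built in one pass plus a direct max scan over window start indices computing each window sum as pre[l+k]-pre[l].
import Mathlib
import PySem

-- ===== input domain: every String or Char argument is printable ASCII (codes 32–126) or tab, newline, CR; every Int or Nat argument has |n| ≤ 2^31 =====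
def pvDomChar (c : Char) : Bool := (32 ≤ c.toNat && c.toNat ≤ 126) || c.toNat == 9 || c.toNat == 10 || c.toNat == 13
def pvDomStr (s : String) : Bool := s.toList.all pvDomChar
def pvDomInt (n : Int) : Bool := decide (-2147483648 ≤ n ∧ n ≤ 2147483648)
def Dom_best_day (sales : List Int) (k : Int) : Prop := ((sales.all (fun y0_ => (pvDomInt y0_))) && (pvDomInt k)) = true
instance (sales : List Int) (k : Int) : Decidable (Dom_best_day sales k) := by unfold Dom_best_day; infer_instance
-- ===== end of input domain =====

-- B replaces A's sliding-window running-sum loop by a prefix-sum list plus a direct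
-- max scan over window start indices (a different decomposition; same cost).

-- ===== PORT A =====
-- A's while-loop body; state = (l, sale_sum, max_sales, best_day), r the loop index
def pvStepA (sales : List Int) (k : Int) (st : Int × Int × Int × Int) (r : Int) : Int × Int × Int × Int :=
  let l := st.1
  let s := st.2.1 + PySem.List.pyGetD sales r 0   -- sales[r]: r always in range, exact
  if r + 1 - l = k then
    if s > st.2.2.1 then
      (l + 1, s - PySem.List.pyGetD sales l 0, s, l)
    else
      (l + 1, s - PySem.List.pyGetD sales l 0, st.2.2.1, st.2.2.2)
  else (l, s, st.2.2.1, st.2.2.2)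

def best_day (sales : List Int) (k : Int) : Int :=
  ((PySem.List.pyRange 0 (sales.length : Int) 1).foldl (pvStepA sales k) (0, 0, 0, 0)).2.2.2

-- ===== PORT B =====
-- pre = prefix-sum list (pre[-1] is Python's negative index); then a max scan over l
def best_day_alt (sales : List Int) (k : Int) : Int :=
  let pre := sales.foldl (fun pre x => pre ++ [PySem.List.pyGetD pre (-1) 0 + x]) [(0 : Int)]
  let st :=
    if k ≥ 1 then
      (PySem.List.pyRange 0 ((sales.length : Int) - k + 1) 1).foldl
        (fun (st : Int × Int) l =>
          let s := PySem.List.pyGetD pre (l + k) 0 - PySem.List.pyGetD pre l 0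
          if s > st.1 then (s, l) else st)
        ((0 : Int), (0 : Int))
    else ((0 : Int), (0 : Int))
  st.2

-- ===== PRECONDITION & SPEC =====
def Spec_best_day (sales : List Int) (k : Int) (out : Int) : Prop := out = best_day_alt sales k
instance (sales : List Int) (k : Int) (out : Int) : Decidable (Spec_best_day sales k out) := by unfold Spec_best_day; infer_instance

-- ===== CLAIM (what is proved, stated in full; the proofs are below) =====
def Claim_equal_best_day : Prop := ∀ (sales : List Int) (k : Int), Dom_best_day sales k → Spec_best_day sales k (best_day sales k)

-- ===== LEMMAS AND PROOFS =====

-- prefix sum of the first i elements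
def pvS (sales : List Int) (i : Int) : Int := (sales.take i.toNat).sum

-- B's loop body, rephrased on prefix sums (bridged to the port by pv_pre lemmas)
def pvStepB (sales : List Int) (k : Int) (st : Int × Int) (l : Int) : Int × Int :=
  if pvS sales (l + k) - pvS sales l > st.1 then (pvS sales (l + k) - pvS sales l, l) else st

theorem pv_pre_build (sales acc : List Int) (c : Int) :
    sales.foldl (fun pre x => pre ++ [PySem.List.pyGetD pre (-1) 0 + x]) (acc ++ [c])
    = acc ++ [c] ++ (List.range sales.length).map (fun i => c + (sales.take (i + 1)).sum) := by
  induction sales generalizing acc c with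
  | nil => simp
  | cons x t ih =>
    simp only [List.foldl_cons, PySem.List.pyGetD_neg_one_append_singleton]
    rw [show acc ++ [c] ++ [c + x] = (acc ++ [c]) ++ [c + x] by simp, ih]
    simp only [List.length_cons, List.range_succ_eq_map, List.map_cons, List.map_map]
    simp [List.append_assoc, Function.comp, add_assoc]

theorem pv_pre_eq (sales : List Int) :
    sales.foldl (fun pre x => pre ++ [PySem.List.pyGetD pre (-1) 0 + x]) [(0 : Int)]
    = (List.range (sales.length + 1)).map (fun j => ((sales.take j).sum : Int)) := by
  have := pv_pre_build sales [] 0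
  simp only [List.nil_append] at this
  rw [this, List.range_succ_eq_map, List.map_cons, List.map_map]
  simp [Function.comp]

theorem pv_pre_get (sales : List Int) (i : Int) (h0 : 0 ≤ i) (h1 : i ≤ (sales.length : Int)) :
    PySem.List.pyGetD ((List.range (sales.length + 1)).map (fun j => ((sales.take j).sum : Int))) i 0
    = pvS sales i := by
  obtain ⟨m, rfl⟩ : ∃ m : Nat, i = (m : Int) := ⟨i.toNat, by omega⟩
  rw [PySem.List.pyGetD_natCast]
  have hm : m < sales.length + 1 := by omega
  simp [List.getD_eq_getElem?_getD, List.getElem?_map, List.getElem?_range, hm, pvS]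

theorem pv_S_succ (sales : List Int) (i : Int) (h0 : 0 ≤ i) (h1 : i < (sales.length : Int)) :
    pvS sales (i + 1) = pvS sales i + PySem.List.pyGetD sales i 0 := by
  obtain ⟨m, rfl⟩ : ∃ m : Nat, i = (m : Int) := ⟨i.toNat, by omega⟩
  rw [PySem.List.pyGetD_natCast]
  have hm : m < sales.length := by omega
  unfold pvS
  rw [show ((m : Int) + 1).toNat = m + 1 by omega, show ((m : Int)).toNat = m by omega]
  rw [List.getD_eq_getElem?_getD, List.getElem?_eq_getElem hm]
  exact List.sum_take_succ sales m hm

-- the main loop invariant, for k ≥ 1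
theorem pv_invariant (sales : List Int) (k : Int) (hk : 1 ≤ k) :
    ∀ r : Nat, r ≤ sales.length →
    (PySem.List.pyRange 0 (r : Int) 1).foldl (pvStepA sales k) (0, 0, 0, 0)
    = (max 0 ((r : Int) - k + 1),
       pvS sales r - pvS sales (max 0 ((r : Int) - k + 1)),
       ((PySem.List.pyRange 0 ((r : Int) - k + 1) 1).foldl (pvStepB sales k) (0, 0)).1,
       ((PySem.List.pyRange 0 ((r : Int) - k + 1) 1).foldl (pvStepB sales k) (0, 0)).2) := by
  intro r
  induction r with
  | zero =>
    intro _
    have h0 : max 0 ((0 : Int) - k + 1) = 0 := by omega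
    rw [PySem.List.pyRange_one_eq_nil (by omega), PySem.List.pyRange_one_eq_nil (by omega)]
    simp only [Nat.cast_zero, List.foldl_nil, h0]
    simp [pvS]
  | succ r ih =>
    intro hr
    have hrn : (r : Int) < (sales.length : Int) := by exact_mod_cast Nat.lt_of_succ_le hr
    rw [show ((r + 1 : Nat) : Int) = (r : Int) + 1 by push_cast; ring]
    rw [PySem.List.pyRange_one_succ_right (by omega), List.foldl_append, ih (Nat.le_of_succ_le hr)]
    simp only [List.foldl_cons, List.foldl_nil]
    by_cases hcase : k ≤ (r : Int) + 1
    · -- a window [r-k+1, r] closes at this step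
      have hL : max 0 ((r : Int) - k + 1) = (r : Int) - k + 1 := by omega
      have hL' : max 0 ((r : Int) + 1 - k + 1) = (r : Int) - k + 1 + 1 := by omega
      rw [hL, hL']
      have hcond : (r : Int) + 1 - ((r : Int) - k + 1) = k := by ring
      have hsum : pvS sales r - pvS sales ((r : Int) - k + 1) + PySem.List.pyGetD sales r 0
          = pvS sales ((r : Int) + 1) - pvS sales ((r : Int) - k + 1) := by
        rw [pv_S_succ sales r (by omega) hrn]; ring
      have hscc : pvS sales ((r : Int) - k + 1 + 1)
          = pvS sales ((r : Int) - k + 1) + PySem.List.pyGetD sales ((r : Int) - k + 1) 0 :=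
        pv_S_succ sales _ (by omega) (by omega)
      rw [show (r : Int) + 1 - k + 1 = (r : Int) - k + 1 + 1 by ring,
          PySem.List.pyRange_one_succ_right (a := 0) (b := (r : Int) - k + 1) (by omega),
          List.foldl_append]
      simp only [List.foldl_cons, List.foldl_nil]
      unfold pvStepA pvStepB
      simp only [hcond, hsum]
      have hwin : (r : Int) - k + 1 + k = (r : Int) + 1 := by ring
      rw [hwin]
      split_ifs
      all_goals simp only [Prod.mk.injEq, true_and, and_true, and_self] <;> omega
    · -- window not yet full: k > r+1
      have hL : max 0 ((r : Int) - k + 1) = 0 := by omega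
      have hL' : max 0 ((r : Int) + 1 - k + 1) = 0 := by omega
      rw [hL, hL']
      have hnil1 : PySem.List.pyRange 0 ((r : Int) - k + 1) 1 = [] :=
        PySem.List.pyRange_one_eq_nil (by omega)
      have hnil2 : PySem.List.pyRange 0 ((r : Int) + 1 - k + 1) 1 = [] :=
        PySem.List.pyRange_one_eq_nil (by omega)
      rw [hnil1, hnil2]
      unfold pvStepA
      have hcond : ¬ ((r : Int) + 1 - 0 = k) := by omega
      simp only [List.foldl_nil, hcond, if_false]
      have hstep := pv_S_succ sales r (by omega) hrn
      simp only [Prod.mk.injEq, true_and, and_true, and_self] <;> omega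

-- when k ≤ 0 A's window condition never fires
theorem pv_k_nonpos (sales : List Int) (k : Int) (hk : k ≤ 0) :
    ∀ r : Nat, r ≤ sales.length →
    (PySem.List.pyRange 0 (r : Int) 1).foldl (pvStepA sales k) (0, 0, 0, 0)
    = (0, pvS sales r, 0, 0) := by
  intro r
  induction r with
  | zero => intro _; rw [PySem.List.pyRange_one_eq_nil (by omega)]; simp [pvS]
  | succ r ih =>
    intro hr
    have hrn : (r : Int) < (sales.length : Int) := by exact_mod_cast Nat.lt_of_succ_le hr
    rw [show ((r + 1 : Nat) : Int) = (r : Int) + 1 by push_cast; ring]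
    rw [PySem.List.pyRange_one_succ_right (by omega), List.foldl_append,
        ih (Nat.le_of_succ_le hr)]
    simp only [List.foldl_cons, List.foldl_nil]
    unfold pvStepA
    have hcond : ¬ ((r : Int) + 1 - 0 = k) := by omega
    simp only [hcond, if_false]
    have hstep := pv_S_succ sales r (by omega) hrn
    simp only [Prod.mk.injEq, true_and, and_true, and_self] <;> omega

-- ===== VERDICT (by name: the statement is the Claim_ definition above) =====
theorem best_day_spec : Claim_equal_best_day := by
  intro sales k _
  simp only [Spec_best_day, best_day, best_day_alt, pv_pre_eq]
  by_cases hk : k ≥ 1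
  · rw [if_pos hk]
    have hcongr : (PySem.List.pyRange 0 ((sales.length : Int) - k + 1) 1).foldl
        (fun (st : Int × Int) l =>
          let s := PySem.List.pyGetD ((List.range (sales.length + 1)).map (fun j => ((sales.take j).sum : Int))) (l + k) 0
                 - PySem.List.pyGetD ((List.range (sales.length + 1)).map (fun j => ((sales.take j).sum : Int))) l 0
          if s > st.1 then (s, l) else st) ((0 : Int), (0 : Int))
      = (PySem.List.pyRange 0 ((sales.length : Int) - k + 1) 1).foldl (pvStepB sales k) ((0 : Int), (0 : Int)) := by
      apply PySem.List.foldl_congr_mem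
      intro acc x hx
      rw [PySem.List.mem_pyRange_one] at hx
      unfold pvStepB
      rw [pv_pre_get sales (x + k) (by omega) (by omega), pv_pre_get sales x (by omega) (by omega)]
    rw [hcongr]
    rw [pv_invariant sales k hk sales.length (le_refl _)]
  · rw [if_neg hk]
    rw [pv_k_nonpos sales k (by omega) sales.length (le_refl _)]
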